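-- pv_equiv track=rewrite | github.com/FelipeBogliolo/Programaci-n_1 | Ejercicios_Funciones_y_Listas/Ejercicio_5.py | busqueda_menor_edad
-- ===== SOURCE A (Python) =====
-- def busqueda_menor_edad(lista_edades: list) -> list:
--     menor_edad = 0
--     indice = []
--     bandera_primer_ingreso = True
--     for i in range(len(lista_edades)):
--         if bandera_primer_ingreso == True or lista_edades[i] <= menor_edad:
--             menor_edad = lista_edades[i]
--             indice += [i]
--             bandera_primer_ingreso = False
--     return indice
-- ===== SOURCE B (Python) =====
-- def busqueda_menor_edad(lista_edades: list) -> list: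
--     # pass 1: prefix minima; pass 2: keep indices where the element equals its prefix minimum
--     pm = []
--     m = None
--     for x in lista_edades:
--         m = x if m is None else (x if x < m else m)
--         pm.append(m)
--     return [i for i, (x, p) in enumerate(zip(lista_edades, pm)) if x == p]
-- ===== Notes on version B (the rewrite author's own statement) =====
-- stated objective: alternative
-- what changed: Replaces A's single flag-and-accumulator scan with a two-pass decomposition: first build the prefix-minimum table, then collect the indices whose element equals its prefix minimum.
import Mathlib
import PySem

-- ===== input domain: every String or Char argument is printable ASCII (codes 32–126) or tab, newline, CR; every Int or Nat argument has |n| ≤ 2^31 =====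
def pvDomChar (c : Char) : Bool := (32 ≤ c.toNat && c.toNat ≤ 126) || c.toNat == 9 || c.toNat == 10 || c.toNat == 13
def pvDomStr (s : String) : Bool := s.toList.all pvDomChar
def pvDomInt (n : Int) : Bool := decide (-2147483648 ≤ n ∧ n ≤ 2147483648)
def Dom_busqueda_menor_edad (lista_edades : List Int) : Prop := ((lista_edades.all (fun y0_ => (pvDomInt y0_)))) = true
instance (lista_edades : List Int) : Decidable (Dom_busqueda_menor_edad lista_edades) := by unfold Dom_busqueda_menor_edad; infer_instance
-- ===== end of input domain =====

-- B replaces A's flag-and-accumulator scan by a prefix-minimum table followed by an equality-collection pass (alternative decomposition, same O(n) cost).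


-- ===== PORT A =====
-- for i in range(len(lista_edades)) with state (menor_edad, indice, bandera);
-- the loop index is always in range, so pyGetD with default 0 is exact here.
def busqueda_menor_edad (lista_edades : List Int) : List Int :=
  ((PySem.List.pyRange 0 (PySem.List.len lista_edades) 1).foldl
    (fun (st : Int × List Int × Bool) i =>
      if st.2.2 == true || decide (PySem.List.pyGetD lista_edades i 0 ≤ st.1) then
        (PySem.List.pyGetD lista_edades i 0, st.2.1 ++ [i], false)
      else st)
    (0, [], true)).2.1

-- ===== PORT B =====
-- pass 1 of Source B: prefix minima (m is None ↔ first element)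
def prefixMins (lista : List Int) : List Int :=
  (lista.foldl
    (fun (st : Option Int × List Int) x =>
      let m := match st.1 with
        | none => x
        | some m => if x < m then x else m
      (some m, st.2 ++ [m]))
    (none, [])).2

-- pass 2 of Source B: the comprehension over enumerate(zip(lista, pm))
def busqueda_menor_edad_alt (lista_edades : List Int) : List Int :=
  (PySem.List.enumerate ((lista_edades.zip (prefixMins lista_edades))) 0).foldl
    (fun acc p => if p.2.1 == p.2.2 then acc ++ [p.1] else acc) []

-- ===== PRECONDITION & SPEC =====
def Spec_busqueda_menor_edad (lista_edades : List Int) (out : List Int) : Prop := out = busqueda_menor_edad_alt lista_edades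
instance (lista_edades : List Int) (out : List Int) : Decidable (Spec_busqueda_menor_edad lista_edades out) := by unfold Spec_busqueda_menor_edad; infer_instance

-- ===== CLAIM (what is proved, stated in full; the proofs are below) =====
def Claim_equal_busqueda_menor_edad : Prop := ∀ (lista_edades : List Int), Dom_busqueda_menor_edad lista_edades → Spec_busqueda_menor_edad lista_edades (busqueda_menor_edad lista_edades)

-- ===== LEMMAS AND PROOFS =====

-- common reference recursion: indices (from s) of elements ≤ the running minimum m
def go (t : List Int) (m : Int) (s : Int) : List Int :=
  match t with
  | [] => []
  | x :: t' => if x ≤ m then s :: go t' x (s + 1) else go t' m (s + 1)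

-- the tail of the prefix-minimum list, given the minimum m of the consumed prefix
def pmTail (t : List Int) (m : Int) : List Int :=
  match t with
  | [] => []
  | x :: t' => (if x < m then x else m) :: pmTail t' (if x < m then x else m)

-- the final running minimum
def pmLast (t : List Int) (m : Int) : Int :=
  match t with
  | [] => m
  | x :: t' => pmLast t' (if x < m then x else m)

lemma prefixMins_aux (t : List Int) (m : Int) (acc : List Int) :
    (t.foldl
      (fun (st : Option Int × List Int) x =>
        let m := match st.1 with
          | none => x
          | some m => if x < m then x else m
        (some m, st.2 ++ [m]))
      (some m, acc)) = (some (pmLast t m), acc ++ pmTail t m) := by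
  induction t generalizing m acc with
  | nil => simp [pmTail, pmLast]
  | cons x t ih =>
    rw [List.foldl_cons]
    rw [show ((let m_1 := match ((some m, acc) : Option Int × List Int).1 with
        | none => x
        | some m => if x < m then x else m
      ((some m_1, (some m, acc).2 ++ [m_1]) : Option Int × List Int))
      = (some (if x < m then x else m), acc ++ [if x < m then x else m])) from rfl]
    rw [ih]
    simp [pmLast, pmTail]

lemma prefixMins_cons (x : Int) (t : List Int) :
    prefixMins (x :: t) = x :: pmTail t x := by
  simp [prefixMins, prefixMins_aux t x [x]]

lemma foldA (t : List Int) (m : Int) (s : Int) (acc : List Int) :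
    ((PySem.List.enumerate t s).foldl
      (fun (st : Int × List Int × Bool) (p : Int × Int) =>
        if st.2.2 == true || decide (p.2 ≤ st.1) then
          (p.2, st.2.1 ++ [p.1], false)
        else st)
      (m, acc, false)).2.1 = acc ++ go t m s := by
  induction t generalizing m s acc with
  | nil => simp [go, PySem.List.enumerate_nil]
  | cons x t ih =>
    rw [PySem.List.enumerate_cons, List.foldl_cons]
    split_ifs with hc
    · have h : x ≤ m := by simpa using hc
      rw [ih]
      simp [go, h]
    · have h : ¬ x ≤ m := by simpa using hc
      rw [ih]
      simp [go, h]

lemma foldB (t : List Int) (m : Int) (s : Int) (acc : List Int) :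
    ((PySem.List.enumerate (t.zip (pmTail t m)) s).foldl
      (fun acc p => if p.2.1 == p.2.2 then acc ++ [p.1] else acc) acc)
      = acc ++ go t m s := by
  induction t generalizing m s acc with
  | nil => simp [go, pmTail, PySem.List.enumerate_nil]
  | cons x t ih =>
    rw [show pmTail (x :: t) m = (if x < m then x else m) :: pmTail t (if x < m then x else m) from rfl,
      List.zip_cons_cons, PySem.List.enumerate_cons, List.foldl_cons]
    by_cases h : x ≤ m
    · have hmin : (if x < m then x else m) = x := by
        split_ifs with hx
        · rfl
        · omega
      rw [hmin]
      split_ifs with hc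
      · rw [ih]
        simp [go, h]
      · exact absurd (by simp) hc
    · have hmin : (if x < m then x else m) = m := by
        split_ifs with hx
        · omega
        · rfl
      rw [hmin]
      split_ifs with hc
      · exact absurd (by simpa using hc) (show ¬ x = m by omega)
      · rw [ih]
        simp [go, h]

lemma portA_eq (l : List Int) :
    busqueda_menor_edad l = match l with
      | [] => []
      | x :: t => 0 :: go t x 1 := by
  unfold busqueda_menor_edad
  have hfold :
      (PySem.List.pyRange 0 (PySem.List.len l) 1).foldl
        (fun (st : Int × List Int × Bool) i =>
          if st.2.2 == true || decide (PySem.List.pyGetD l i 0 ≤ st.1) then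
            (PySem.List.pyGetD l i 0, st.2.1 ++ [i], false)
          else st)
        (0, [], true)
      = (PySem.List.enumerate l 0).foldl
        (fun (st : Int × List Int × Bool) (p : Int × Int) =>
          if st.2.2 == true || decide (p.2 ≤ st.1) then
            (p.2, st.2.1 ++ [p.1], false)
          else st)
        (0, [], true) := by
    rw [PySem.List.enumerate_eq_map_pyRange (d := 0), List.foldl_map]
  rw [hfold]
  cases l with
  | nil => simp [PySem.List.enumerate_nil]
  | cons x t =>
    rw [PySem.List.enumerate_cons, List.foldl_cons]
    split_ifs with hc
    · exact foldA t x 1 [(0 : Int)]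
    · exact absurd (by simp) hc

lemma portB_eq (l : List Int) :
    busqueda_menor_edad_alt l = match l with
      | [] => []
      | x :: t => 0 :: go t x 1 := by
  unfold busqueda_menor_edad_alt
  cases l with
  | nil => simp [prefixMins, PySem.List.enumerate_nil]
  | cons x t =>
    rw [prefixMins_cons, List.zip_cons_cons, PySem.List.enumerate_cons, List.foldl_cons]
    split_ifs with hc
    · exact foldB t x 1 [(0 : Int)]
    · exact absurd (by simp) hc

-- ===== VERDICT (by name: the statement is the Claim_ definition above) =====
theorem busqueda_menor_edad_spec : Claim_equal_busqueda_menor_edad := by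
  intro l _
  unfold Spec_busqueda_menor_edad
  rw [portA_eq, portB_eq]
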